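-- pv_equiv track=rewrite | github.com/camronlupton/adventofcode_2025 | aoc_2025_03/aoc_2025_03_solution.py | findLargestOne
-- ===== SOURCE A (Python) =====
-- def findLargestOne(list, omitStart, omitEnd):
--     currentHighestNum = 0
--     currentIndex = 0
--     indexFound = None
--     list = list[omitStart:len(list)-omitEnd]
--     for num in list:
--         if num > currentHighestNum:
--             currentHighestNum = num
--             indexFound = currentIndex
--         currentIndex += 1
--     return currentHighestNum, indexFound
-- ===== SOURCE B (Python) =====
-- def findLargestOne(list, omitStart, omitEnd):
--     sub = list[omitStart:len(list)-omitEnd]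
--     m = max(sub, default=0)
--     if m > 0:
--         return m, sub.index(m)
--     return 0, None
-- ===== Notes on version B (the rewrite author's own statement) =====
-- stated objective: simpler
-- what changed: Replaces the fused manual loop that tracks the running max, a counter and the found index with a two-pass decomposition: compute max(sub, default=0), then locate its first index with sub.index only when it is positive.
import Mathlib
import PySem

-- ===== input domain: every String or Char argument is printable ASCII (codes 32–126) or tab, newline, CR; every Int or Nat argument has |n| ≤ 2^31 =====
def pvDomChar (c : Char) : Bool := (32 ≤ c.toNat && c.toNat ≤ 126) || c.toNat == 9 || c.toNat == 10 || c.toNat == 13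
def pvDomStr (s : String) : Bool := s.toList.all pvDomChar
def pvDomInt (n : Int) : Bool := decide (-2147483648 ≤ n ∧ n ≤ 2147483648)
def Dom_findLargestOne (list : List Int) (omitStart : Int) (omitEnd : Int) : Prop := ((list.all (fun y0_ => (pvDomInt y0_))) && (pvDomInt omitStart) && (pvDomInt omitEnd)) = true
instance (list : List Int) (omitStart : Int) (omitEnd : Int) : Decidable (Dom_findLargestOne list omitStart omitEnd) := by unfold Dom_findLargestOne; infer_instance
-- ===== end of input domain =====

-- B computes the slice's maximum first (default 0) and then locates its first index in a
-- separate pass, replacing A's fused loop that tracks max, counter and index together.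

-- ===== PORT A =====
-- the for-loop of A: state (currentHighestNum, currentIndex, indexFound)
def findLargestOneLoop : List Int → Int → Int → Option Int → Int × Option Int
  | [], high, _, found => (high, found)
  | n :: t, high, i, found =>
    if n > high then findLargestOneLoop t n (i + 1) (some i)
    else findLargestOneLoop t high (i + 1) found

def findLargestOne (list : List Int) (omitStart : Int) (omitEnd : Int) : Int × Option Int :=
  let l := PySem.List.slice list (some omitStart) (some ((list.length : Int) - omitEnd))
  findLargestOneLoop l 0 0 none

-- ===== PORT B =====
def findLargestOne_alt (list : List Int) (omitStart : Int) (omitEnd : Int) : Int × Option Int :=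
  let sub := PySem.List.slice list (some omitStart) (some ((list.length : Int) - omitEnd))
  let m := (PySem.List.max? sub (fun y => y)).getD 0
  if m > 0 then (m, (PySem.List.index? sub m).map (fun k : Nat => (k : Int)))
  else (0, none)

-- ===== PRECONDITION & SPEC =====
def Spec_findLargestOne (list : List Int) (omitStart : Int) (omitEnd : Int) (out : Int × Option Int) : Prop := out = findLargestOne_alt list omitStart omitEnd
instance (list : List Int) (omitStart : Int) (omitEnd : Int) (out : Int × Option Int) : Decidable (Spec_findLargestOne list omitStart omitEnd out) := by unfold Spec_findLargestOne; infer_instance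

-- ===== CLAIM (what is proved, stated in full; the proofs are below) =====
def Claim_equal_findLargestOne : Prop := ∀ (list : List Int) (omitStart : Int) (omitEnd : Int), Dom_findLargestOne list omitStart omitEnd → Spec_findLargestOne list omitStart omitEnd (findLargestOne list omitStart omitEnd)

-- ===== LEMMAS AND PROOFS =====

theorem foldl_max_init (l : List Int) (a b : Int) :
    l.foldl max (max a b) = max a (l.foldl max b) := by
  induction l generalizing a b with
  | nil => simp [List.foldl]
  | cons c t ih =>
    simp only [List.foldl]
    rw [max_assoc, ih]

theorem init_le_foldl_max (l : List Int) (b : Int) : b ≤ l.foldl max b := by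
  induction l generalizing b with
  | nil => simp [List.foldl]
  | cons c t ih =>
    simp only [List.foldl]
    exact le_trans (le_max_left b c) (ih _)

-- characterisation of A's loop: first component is the running max, second the
-- (shifted) first index of the max when it exceeds the initial threshold
theorem findLargestOneLoop_spec (l : List Int) (h i : Int) (f : Option Int) :
    findLargestOneLoop l h i f =
      (l.foldl max h,
       if l.foldl max h > h then
         (PySem.List.index? l (l.foldl max h)).map (fun k : Nat => i + (k : Int))
       else f) := by
  induction l generalizing h i f with
  | nil => simp [findLargestOneLoop, List.foldl]
  | cons n t ih =>
    simp only [findLargestOneLoop, List.foldl]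
    by_cases hn : n > h
    · rw [if_pos hn, ih]
      rw [max_eq_right (le_of_lt hn)]
      set F := t.foldl max n with hF
      have hFn : n ≤ F := init_le_foldl_max t n
      have hFh : F > h := lt_of_lt_of_le hn hFn
      by_cases hFgt : F > n
      · rw [if_pos hFgt, if_pos hFh]
        rw [PySem.List.index?_cons_of_ne t (ne_of_lt hFgt), Option.map_map]
        refine congrArg (Prod.mk F) ?_
        exact congrArg (fun g => Option.map g (PySem.List.index? t F))
          (funext fun k => by simp only [Function.comp_apply]; push_cast; ring)
      · rw [if_neg hFgt, if_pos hFh]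
        have hFeq : F = n := le_antisymm (not_lt.mp hFgt) hFn
        rw [hFeq, PySem.List.index?_cons_self]
        simp
    · rw [if_neg hn, ih]
      rw [max_eq_left (not_lt.mp hn)]
      set F := t.foldl max h with hF
      by_cases hFgt : F > h
      · rw [if_pos hFgt, if_pos hFgt]
        have hne : n ≠ F := ne_of_lt (lt_of_le_of_lt (not_lt.mp hn) hFgt)
        rw [PySem.List.index?_cons_of_ne t hne, Option.map_map]
        refine congrArg (Prod.mk F) ?_
        exact congrArg (fun g => Option.map g (PySem.List.index? t F))
          (funext fun k => by simp only [Function.comp_apply]; push_cast; ring)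
      · rw [if_neg hFgt, if_neg hFgt]

-- the two strategies agree on any sub-list (threshold 0, offset 0)
theorem loop_eq_two_pass (sub : List Int) :
    findLargestOneLoop sub 0 0 none =
      (if (PySem.List.max? sub (fun y => y)).getD 0 > 0 then
         ((PySem.List.max? sub (fun y => y)).getD 0,
          (PySem.List.index? sub ((PySem.List.max? sub (fun y => y)).getD 0)).map (fun k : Nat => (k : Int)))
       else (0, none)) := by
  rw [findLargestOneLoop_spec]
  cases sub with
  | nil => simp [PySem.List.max?, List.foldl]
  | cons x t =>
    rw [PySem.List.max?_id_cons]
    simp only [Option.getD_some, List.foldl]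
    rw [foldl_max_init t 0 x]
    set m := t.foldl max x with hm
    by_cases hpos : m > 0
    · rw [max_eq_right (le_of_lt hpos), if_pos hpos, if_pos hpos]
      refine congrArg (Prod.mk m) ?_
      exact congrArg (fun g => Option.map g (PySem.List.index? (x :: t) m))
        (funext fun k => zero_add ((k : Int)))
    · rw [max_eq_left (not_lt.mp hpos), if_neg hpos]
      simp

-- ===== VERDICT (by name: the statement is the Claim_ definition above) =====
theorem findLargestOne_spec : Claim_equal_findLargestOne := by
  intro list omitStart omitEnd _
  unfold Spec_findLargestOne findLargestOne findLargestOne_alt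
  exact loop_eq_two_pass _
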